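-- pv_equiv track=rewrite | github.com/Extrieve/HackerRank-Python | double_strings.py | s_string2
-- ===== SOURCE A (Python) =====
-- def s_string2(strings):
--
--     output = []
--     available = set(strings)
--     for string in strings:
--         flag = False
--         for i in range(len(string)):
--             if string[i:] in available and string[:i] in available:
--                 flag = True
--                 break
--         output.append('0') if not flag else output.append('1')
--
--     return ''.join(output)
-- ===== SOURCE B (Python) =====
-- def s_string2(strings):
--     available = set(strings)
--     lengths = {len(t) for t in available}
--     def splittable(s):
--         return any(i < len(s) and s[:i] in available and s[i:] in available
--                    for i in lengths)
--     return ''.join('1' if splittable(s) else '0' for s in strings)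
-- ===== Notes on version B (the rewrite author's own statement) =====
-- stated objective: alternative
-- what changed: B precomputes the set of distinct member-string lengths once and, per string, tests only those candidate split lengths (prefix and suffix set lookups), instead of A's inner scan over every split index; output built by map/join instead of an accumulator loop with break.
import Mathlib
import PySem

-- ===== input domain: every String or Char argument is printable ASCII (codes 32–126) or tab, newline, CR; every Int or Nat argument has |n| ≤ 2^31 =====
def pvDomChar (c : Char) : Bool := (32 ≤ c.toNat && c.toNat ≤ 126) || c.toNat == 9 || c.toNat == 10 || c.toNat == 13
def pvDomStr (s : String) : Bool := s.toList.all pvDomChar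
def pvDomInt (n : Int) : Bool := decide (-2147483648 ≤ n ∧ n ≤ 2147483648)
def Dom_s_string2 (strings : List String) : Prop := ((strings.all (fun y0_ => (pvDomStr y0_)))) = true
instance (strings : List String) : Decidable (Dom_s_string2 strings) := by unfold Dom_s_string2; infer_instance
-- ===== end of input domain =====

-- B precomputes the set of distinct member lengths and tests only those split lengths,
-- instead of A's scan over every split index of every string; alternative decomposition.

-- ===== PORT A =====
def s_string2 (strings : List String) : String :=
  let available : PySem.Set String := PySem.Set.ofList strings
  let output : List String :=
    strings.foldl (fun output string =>
      let flag :=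
        (PySem.List.pyRange 0 (PySem.Str.len string) 1).any (fun i =>
          PySem.Set.contains available (PySem.Str.slice string (some i) none) &&
          PySem.Set.contains available (PySem.Str.slice string none (some i)))
      if !flag then output ++ ["0"] else output ++ ["1"]) []
  PySem.Str.join "" output

-- ===== PORT B =====
def s_string2_alt (strings : List String) : String :=
  let available : PySem.Set String := PySem.Set.ofList strings
  let lengths : PySem.Set Int := PySem.Set.ofList (available.map PySem.Str.len)
  let splittable : String → Bool := fun s =>
    lengths.any (fun i =>
      decide (i < PySem.Str.len s) &&
      PySem.Set.contains available (PySem.Str.slice s none (some i)) &&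
      PySem.Set.contains available (PySem.Str.slice s (some i) none))
  PySem.Str.join "" (strings.map (fun s => if splittable s then "1" else "0"))

-- ===== PRECONDITION & SPEC =====
def Spec_s_string2 (strings : List String) (out : String) : Prop := out = s_string2_alt strings
instance (strings : List String) (out : String) : Decidable (Spec_s_string2 strings out) := by unfold Spec_s_string2; infer_instance

-- ===== CLAIM (what is proved, stated in full; the proofs are below) =====
def Claim_equal_s_string2 : Prop := ∀ (strings : List String), Dom_s_string2 strings → Spec_s_string2 strings (s_string2 strings)

-- ===== LEMMAS AND PROOFS =====

theorem slice_to_toList (s : String) (k : ℕ) :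
    (PySem.Str.slice s none (some (k:Int))).toList = s.toList.take k := by
  simp [PySem.Str.toList_slice, PySem.Chars.slice_eq_listSlice, PySem.List.slice_to_natCast]

-- per-string flag equality: A's split-index scan equals B's member-length scan
theorem flag_eq (av : List String) (s : String) :
    ((PySem.List.pyRange 0 (PySem.Str.len s) 1).any (fun i =>
        PySem.Set.contains av (PySem.Str.slice s (some i) none) &&
        PySem.Set.contains av (PySem.Str.slice s none (some i))))
    =
    ((PySem.Set.ofList (av.map PySem.Str.len)).any (fun i =>
      decide (i < PySem.Str.len s) &&
      PySem.Set.contains av (PySem.Str.slice s none (some i)) &&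
      PySem.Set.contains av (PySem.Str.slice s (some i) none))) := by
  apply Bool.eq_iff_iff.mpr
  simp only [List.any_eq_true, Bool.and_eq_true, decide_eq_true_eq,
    PySem.Set.contains_iff, PySem.List.mem_pyRange_one, PySem.Set.mem_ofList,
    List.mem_map, PySem.Str.len_eq, and_assoc]
  constructor
  · rintro ⟨i, hi0, hin, hsuf, hpre⟩
    lift i to ℕ using hi0 with k
    have hk : k < s.toList.length := by exact_mod_cast hin
    have hlen : ((PySem.Str.slice s none (some (k:Int))).toList.length : Int) = (k:Int) := by
      rw [slice_to_toList, List.length_take]; push_cast; omega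
    exact ⟨(k:Int), ⟨PySem.Str.slice s none (some (k:Int)), hpre, hlen⟩, hin, hpre, hsuf⟩
  · rintro ⟨i, ⟨t, _, hti⟩, hin, hpre, hsuf⟩
    exact ⟨i, by omega, hin, hsuf, hpre⟩

theorem foldl_out (flagA flagB : String → Bool) (h : ∀ s, flagA s = flagB s) :
    ∀ (l : List String) (acc : List String),
      l.foldl (fun o s => if !(flagA s) then o ++ ["0"] else o ++ ["1"]) acc
      = acc ++ l.map (fun s => if flagB s then "1" else "0") := by
  intro l
  induction l with
  | nil => simp
  | cons x xs ih =>
    intro acc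
    simp only [List.foldl_cons, List.map_cons, ih]
    rw [h x]
    cases hb : flagB x <;> simp

theorem s_string2_eq_alt (strings : List String) :
    s_string2 strings = s_string2_alt strings := by
  unfold s_string2 s_string2_alt
  simp only []
  rw [foldl_out
    (fun s => (PySem.List.pyRange 0 (PySem.Str.len s) 1).any (fun i =>
        PySem.Set.contains (PySem.Set.ofList strings) (PySem.Str.slice s (some i) none) &&
        PySem.Set.contains (PySem.Set.ofList strings) (PySem.Str.slice s none (some i))))
    (fun s => (PySem.Set.ofList ((PySem.Set.ofList strings).map PySem.Str.len)).any (fun i =>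
      decide (i < PySem.Str.len s) &&
      PySem.Set.contains (PySem.Set.ofList strings) (PySem.Str.slice s none (some i)) &&
      PySem.Set.contains (PySem.Set.ofList strings) (PySem.Str.slice s (some i) none)))
    (fun s => flag_eq (PySem.Set.ofList strings) s) strings []]
  simp

-- ===== VERDICT (by name: the statement is the Claim_ definition above) =====
theorem s_string2_spec : Claim_equal_s_string2 := by
  intro strings _
  unfold Spec_s_string2
  exact s_string2_eq_alt strings
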